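-- pv_equiv track=rewrite | github.com/briney/spir | src/spir/glycan_convert.py | _parse_af3_server_components
-- ===== SOURCE A (Python) =====
-- from typing import List, Literal, Tuple
--
-- def _parse_af3_server_components(glycan_residues_spec: str) -> List[str]:
--     """Extract component CCD codes from an AF3 Server glycan residues string.
--
--     This mirrors the lightweight extraction used in the AF3 Server adapter:
--     take tokens that look like CCD codes (alnum/underscore/hyphen), ignoring
--     parentheses and link annotations.
--     """
--     comp: List[str] = []
--     buf: List[str] = []
--     i = 0
--     s = glycan_residues_spec.strip()
--     while i < len(s):
--         ch = s[i]
--         if ch.isalnum() or ch in {"_", "-"}: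
--             buf.append(ch)
--             i += 1
--             continue
--         if buf:
--             comp.append("".join(buf))
--             buf = []
--         i += 1
--     if buf:
--         comp.append("".join(buf))
--     # Filter out empty tokens
--     comp = [c for c in comp if c]
--     if not comp:
--         raise ValueError("No CCD components could be parsed from glycan string")
--     return comp
-- ===== SOURCE B (Python) =====
-- from itertools import groupby
-- from typing import List
--
--
-- def _parse_af3_server_components(glycan_residues_spec: str) -> List[str]:
--     comp = [
--         "".join(g)
--         for key, g in groupby(
--             glycan_residues_spec.strip(), lambda c: c.isalnum() or c in "_-"
--         )
--         if key
--     ]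
--     if not comp:
--         raise ValueError("No CCD components could be parsed from glycan string")
--     return comp
-- ===== Notes on version B (the rewrite author's own statement) =====
-- stated objective: idiomatic
-- what changed: Replaced the manual index/buffer while-loop with itertools.groupby keyed by the token-character predicate, taking the True-keyed runs as tokens.
import Mathlib
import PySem

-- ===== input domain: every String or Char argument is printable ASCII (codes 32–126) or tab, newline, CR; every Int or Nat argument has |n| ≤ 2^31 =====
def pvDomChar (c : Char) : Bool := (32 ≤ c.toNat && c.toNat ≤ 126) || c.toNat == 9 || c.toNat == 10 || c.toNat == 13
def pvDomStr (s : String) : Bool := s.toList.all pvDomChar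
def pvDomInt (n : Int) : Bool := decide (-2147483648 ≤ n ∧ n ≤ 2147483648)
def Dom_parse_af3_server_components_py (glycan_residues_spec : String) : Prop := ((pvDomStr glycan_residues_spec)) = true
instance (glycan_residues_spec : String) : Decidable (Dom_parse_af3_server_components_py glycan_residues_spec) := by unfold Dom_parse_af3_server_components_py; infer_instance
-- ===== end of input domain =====

-- B replaces A's manual index-and-buffer while-loop with a groupby decomposition
-- (runs of token characters become the tokens); objective: idiomatic, same cost.


-- shared token-character predicate: ch.isalnum() or ch in {"_", "-"}
def pvTok (c : Char) : Bool := PySem.Chars.isalnum c || c == '_' || c == '-'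

-- ===== PORT A =====
-- the while-loop of A: scan chars, growing buf on token chars, flushing buf to comp otherwise
def pvLoopA : List Char → List Char → List String → List String
  | [], buf, comp => if buf.isEmpty then comp else comp ++ [String.ofList buf]
  | c :: rest, buf, comp =>
    if pvTok c then pvLoopA rest (buf ++ [c]) comp
    else if buf.isEmpty then pvLoopA rest buf comp
    else pvLoopA rest [] (comp ++ [String.ofList buf])

def parse_af3_server_components_py (glycan_residues_spec : String) : List String :=
  let comp := pvLoopA (PySem.Str.strip glycan_residues_spec).toList [] []
  comp.filter (fun c => c != "")   -- [c for c in comp if c]; the 'raise' branch is outside Pre_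

-- ===== PORT B =====
-- itertools.groupby over the stripped string, keyed by pvTok (consecutive equal-key runs)
def pvGroups : List Char → List (Bool × List Char)
  | [] => []
  | c :: rest =>
    match pvGroups rest with
    | (k, g) :: gs => if pvTok c == k then (k, c :: g) :: gs else (pvTok c, [c]) :: (k, g) :: gs
    | [] => [(pvTok c, [c])]

def parse_af3_server_components_py_alt (glycan_residues_spec : String) : List String :=
  ((pvGroups (PySem.Str.strip glycan_residues_spec).toList).filter (·.1)).map
    (fun p => String.ofList p.2)   -- the 'raise' branch is outside Pre_

-- ===== PRECONDITION & SPEC =====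
-- Pre_ excludes exactly the inputs with no token character, on which the Python A raises ValueError
def Pre_parse_af3_server_components_py (glycan_residues_spec : String) : Prop :=
  glycan_residues_spec.toList.any pvTok = true
instance (glycan_residues_spec : String) : Decidable (Pre_parse_af3_server_components_py glycan_residues_spec) := by unfold Pre_parse_af3_server_components_py; infer_instance
def pvWitness_parse_af3_server_components_py : String := "NAG(4-1 BMA)"

def Spec_parse_af3_server_components_py (glycan_residues_spec : String) (out : List String) : Prop := out = parse_af3_server_components_py_alt glycan_residues_spec
instance (glycan_residues_spec : String) (out : List String) : Decidable (Spec_parse_af3_server_components_py glycan_residues_spec out) := by unfold Spec_parse_af3_server_components_py; infer_instance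

-- ===== CLAIM (what is proved, stated in full; the proofs are below) =====
def Claim_equal_parse_af3_server_components_py : Prop := ∀ (glycan_residues_spec : String), Dom_parse_af3_server_components_py glycan_residues_spec → Pre_parse_af3_server_components_py glycan_residues_spec → Spec_parse_af3_server_components_py glycan_residues_spec (parse_af3_server_components_py glycan_residues_spec)

-- ===== LEMMAS AND PROOFS =====

-- the tokens B extracts from a character list
def pvTokB (cs : List Char) : List String :=
  ((pvGroups cs).filter (fun p : Bool × List Char => p.1)).map (fun p => String.ofList p.2)

theorem pvGroups_head (c : Char) (xs : List Char) :
    ∃ g gs, pvGroups (c :: xs) = (pvTok c, g) :: gs := by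
  simp only [pvGroups]
  cases h : pvGroups xs with
  | nil => exact ⟨[c], [], rfl⟩
  | cons p gs =>
    obtain ⟨k, g⟩ := p
    by_cases hk : pvTok c == k
    · refine ⟨c :: g, gs, ?_⟩
      simp only [hk, if_pos]
      rw [eq_of_beq hk]
    · exact ⟨[c], (k, g) :: gs, by simp [hk]⟩

theorem pvGroups_ne_nil (xs : List Char) : ∀ p ∈ pvGroups xs, p.2 ≠ [] := by
  induction xs with
  | nil => intro p hp; simp [pvGroups] at hp
  | cons c rest ih =>
    intro p hp
    simp only [pvGroups] at hp
    revert hp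
    cases h : pvGroups rest with
    | nil => intro hp; simp at hp; simp [hp]
    | cons q gs =>
      obtain ⟨k, g⟩ := q
      by_cases hk : pvTok c == k
      · simp only [hk, if_pos]
        intro hp
        rcases List.mem_cons.mp hp with h1 | h2
        · simp [h1]
        · exact ih p (by rw [h]; exact List.mem_cons_of_mem _ h2)
      · simp only [hk, Bool.false_eq_true, if_neg, not_false_iff]
        intro hp
        rcases List.mem_cons.mp hp with h1 | h2
        · simp [h1]
        · exact ih p (by rw [h]; exact h2)

-- prepending a non-token char does not change the extracted tokens
theorem pvTokB_cons_false (c : Char) (rest : List Char) (hc : pvTok c = false) :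
    pvTokB (c :: rest) = pvTokB rest := by
  unfold pvTokB
  simp only [pvGroups]
  cases h : pvGroups rest with
  | nil => simp [hc]
  | cons q gs =>
    obtain ⟨k, g⟩ := q
    cases k
    · simp [hc, List.filter]
    · simp [hc, List.filter]

-- a nonempty all-token run prepended to nothing or a list starting with a non-token char
theorem pvGroups_tok_prepend (buf ys : List Char) (hne : buf ≠ [])
    (hall : ∀ c ∈ buf, pvTok c = true)
    (hys : ys = [] ∨ ∃ c rest, ys = c :: rest ∧ pvTok c = false) :
    pvGroups (buf ++ ys) = (true, buf) :: pvGroups ys := by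
  induction buf with
  | nil => exact absurd rfl hne
  | cons a buf ih =>
    have ha : pvTok a = true := hall a (by simp)
    cases buf with
    | nil =>
      simp only [List.singleton_append, pvGroups]
      rcases hys with h | ⟨c, rest, h, hc⟩
      · simp [h, ha, pvGroups]
      · obtain ⟨g, gs, hg⟩ := pvGroups_head c rest
        rw [h, hg]
        simp [ha, hc]
    | cons b buf' =>
      have hrec := ih (by simp) (fun c hc => hall c (List.mem_cons_of_mem _ hc))
      rw [List.cons_append]
      simp only [pvGroups]
      rw [hrec]
      simp [ha]

theorem pvTokB_nil : pvTokB [] = [] := rfl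

-- tokens of an all-token nonempty run followed by nothing / a non-token char
theorem pvTokB_tok_prepend (buf ys : List Char) (hne : buf ≠ [])
    (hall : ∀ c ∈ buf, pvTok c = true)
    (hys : ys = [] ∨ ∃ c rest, ys = c :: rest ∧ pvTok c = false) :
    pvTokB (buf ++ ys) = String.ofList buf :: pvTokB ys := by
  unfold pvTokB
  rw [pvGroups_tok_prepend buf ys hne hall hys]
  simp [List.filter]

-- the loop of A computes B's tokens, with buf as the pending all-token run
theorem pvLoopA_eq (cs : List Char) : ∀ (buf : List Char) (comp : List String),
    (∀ c ∈ buf, pvTok c = true) →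
    pvLoopA cs buf comp = comp ++ pvTokB (buf ++ cs) := by
  induction cs with
  | nil =>
    intro buf comp hall
    cases hb : buf.isEmpty with
    | true =>
      have hbe : buf = [] := by simpa [List.isEmpty_iff] using hb
      simp [pvLoopA, hbe, pvTokB_nil]
    | false =>
      have hne : buf ≠ [] := by simpa [List.isEmpty_iff] using hb
      simp only [pvLoopA, hb, Bool.false_eq_true, if_neg, not_false_iff, List.append_nil]
      have h := pvTokB_tok_prepend buf [] hne hall (Or.inl rfl)
      rw [List.append_nil] at h
      rw [h, pvTokB_nil]
  | cons c rest ih =>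
    intro cbuf comp hall
    by_cases hc : pvTok c = true
    · simp only [pvLoopA, hc, if_pos]
      rw [ih (cbuf ++ [c]) comp (by intro x hx; rcases List.mem_append.mp hx with h | h
                                    exacts [hall x h, by simp at h; simp [h, hc]])]
      simp
    · have hc' : pvTok c = false := by simpa using hc
      cases hb : cbuf.isEmpty with
      | true =>
        have hbe : cbuf = [] := by simpa [List.isEmpty_iff] using hb
        simp only [pvLoopA, hc', Bool.false_eq_true, if_neg, not_false_iff, hb, if_pos]
        rw [ih cbuf comp hall, hbe]
        simp only [List.nil_append]
        rw [pvTokB_cons_false c rest hc']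
      | false =>
        have hne : cbuf ≠ [] := by simpa [List.isEmpty_iff] using hb
        simp only [pvLoopA, hc', hb, Bool.false_eq_true, if_neg, not_false_iff]
        rw [ih [] (comp ++ [String.ofList cbuf]) (by simp)]
        simp only [List.nil_append]
        rw [pvTokB_tok_prepend cbuf (c :: rest) hne hall (Or.inr ⟨c, rest, rfl, hc'⟩)]
        rw [pvTokB_cons_false c rest hc']
        simp

-- B's tokens are all nonempty strings, so A's final filter is the identity
theorem pvTokB_filter (cs : List Char) :
    (pvTokB cs).filter (fun c => c != "") = pvTokB cs := by
  apply List.filter_eq_self.mpr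
  intro s hs
  unfold pvTokB at hs
  obtain ⟨p, hp, hps⟩ := List.mem_map.mp hs
  have hne := pvGroups_ne_nil cs p (List.mem_of_mem_filter hp)
  subst hps
  cases h : p.2 with
  | nil => exact absurd h hne
  | cons a l => simp [String.ext_iff]

-- ===== VERDICT (by name: the statement is the Claim_ definition above) =====
theorem parse_af3_server_components_py_spec : Claim_equal_parse_af3_server_components_py := by
  intro s _ _
  show (pvLoopA (PySem.Str.strip s).toList [] []).filter (fun c => c != "") =
    parse_af3_server_components_py_alt s
  rw [pvLoopA_eq _ [] [] (by simp)]
  simp only [List.nil_append]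
  exact pvTokB_filter _
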